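-- pv_equiv track=rewrite | github.com/joebernal/CSUF-Course-Recommendation-System | backend/services/plan_generator.py | build_semester_sequence
-- ===== SOURCE A (Python) =====
-- def build_semester_sequence(starting_term, starting_year, available_winter, available_summer, max_terms):
--     base_order = ["Winter", "Spring", "Summer", "Fall"]
--
--     allowed_terms = []
--     for term in base_order:
--         if term == "Winter" and not available_winter:
--             continue
--         if term == "Summer" and not available_summer:
--             continue
--         allowed_terms.append(term)
--
--     if starting_term not in allowed_terms:
--         raise ValueError(f"Starting term '{starting_term}' is not allowed for this user.")
--
--     start_index = allowed_terms.index(starting_term)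
--
--     sequence = []
--     current_year = starting_year
--     idx = start_index
--
--     while len(sequence) < max_terms:
--         term = allowed_terms[idx]
--         sequence.append((term, current_year))
--
--         idx += 1
--         if idx >= len(allowed_terms):
--             idx = 0
--             current_year += 1
--
--     return sequence
-- ===== SOURCE B (Python) =====
-- def build_semester_sequence(starting_term, starting_year, available_winter, available_summer, max_terms):
--     allowed_terms = [t for t in ("Winter", "Spring", "Summer", "Fall")
--                      if (t != "Winter" or available_winter) and (t != "Summer" or available_summer)]
--
--     if starting_term not in allowed_terms:
--         raise ValueError(f"Starting term '{starting_term}' is not allowed for this user.")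
--
--     start = allowed_terms.index(starting_term)
--     n = len(allowed_terms)
--
--     if max_terms <= 0:
--         return []
--
--     # Build the full rectangular table of every (term, year) of every calendar
--     # year the plan touches, then slice out the requested window.
--     years_touched = (start + max_terms + n - 1) // n
--     table = [(term, starting_year + y) for y in range(years_touched) for term in allowed_terms]
--     return table[start:start + max_terms]
-- ===== Notes on version B (the rewrite author's own statement) =====
-- stated objective: alternative
-- what changed: Instead of a stateful while loop that walks a wrapping index and increments the year, B pre-computes how many calendar years the plan touches, materialises the full rectangular years-by-terms table, and slices out the window [start, start+max_terms).
import Mathlib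
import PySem

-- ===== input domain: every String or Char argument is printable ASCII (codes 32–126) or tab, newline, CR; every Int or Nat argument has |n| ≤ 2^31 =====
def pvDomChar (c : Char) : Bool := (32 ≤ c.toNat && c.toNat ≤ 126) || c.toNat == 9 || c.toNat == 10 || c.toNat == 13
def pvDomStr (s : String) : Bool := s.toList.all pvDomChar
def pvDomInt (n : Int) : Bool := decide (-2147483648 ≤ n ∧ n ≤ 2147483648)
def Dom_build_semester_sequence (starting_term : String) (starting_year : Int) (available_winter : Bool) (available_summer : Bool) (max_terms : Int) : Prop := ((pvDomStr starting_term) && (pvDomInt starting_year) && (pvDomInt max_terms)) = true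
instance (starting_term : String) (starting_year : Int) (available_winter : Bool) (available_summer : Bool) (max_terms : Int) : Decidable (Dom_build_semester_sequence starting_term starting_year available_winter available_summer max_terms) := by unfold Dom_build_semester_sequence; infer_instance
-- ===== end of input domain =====

-- B replaces A's stateful wrapping while loop by building the full years-by-terms table and
-- slicing out the requested window; Pre_ excludes the inputs where A raises ValueError.
-- ===== PORT A =====
-- the while loop: fuel = number of elements still to append; in-range index access
-- is allowed.getD idx "" (idx is always < allowed.length when started at a valid index)
def pvLoopA (allowed : List String) : Nat → Nat → Int → List (String × Int)
  | 0, _, _ => []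
  | fuel + 1, idx, year =>
    let term := allowed.getD idx ""
    let idx' := idx + 1
    if idx' ≥ allowed.length then
      (term, year) :: pvLoopA allowed fuel 0 (year + 1)
    else
      (term, year) :: pvLoopA allowed fuel idx' year

def build_semester_sequence (starting_term : String) (starting_year : Int) (available_winter : Bool) (available_summer : Bool) (max_terms : Int) : List (String × Int) :=
  let base_order := ["Winter", "Spring", "Summer", "Fall"]
  let allowed_terms := base_order.foldl (fun acc term =>
      if term = "Winter" ∧ ¬ available_winter then acc
      else if term = "Summer" ∧ ¬ available_summer then acc
      else acc ++ [term]) []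
  match PySem.List.index? allowed_terms starting_term with
  | none => []   -- Python raises ValueError here; excluded by Pre_
  | some start_index => pvLoopA allowed_terms max_terms.toNat start_index starting_year

-- ===== PORT B =====
def build_semester_sequence_alt (starting_term : String) (starting_year : Int) (available_winter : Bool) (available_summer : Bool) (max_terms : Int) : List (String × Int) :=
  let allowed := (["Winter", "Spring", "Summer", "Fall"]).filter
      (fun t => (t ≠ "Winter" ∨ available_winter) ∧ (t ≠ "Summer" ∨ available_summer))
  match PySem.List.index? allowed starting_term with
  | none => []   -- Python raises ValueError here; excluded by Pre_
  | some start =>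
    let n := allowed.length
    if max_terms ≤ 0 then []
    else
      let m := max_terms.toNat
      let years_touched := (start + m + n - 1) / n   -- Python '//' on nonnegative ints = Nat division, exact
      let table := (List.range years_touched).flatMap
          (fun (y : Nat) => allowed.map (fun t => (t, starting_year + (y : Int))))
      -- Python slice table[start : start+m] with 0 ≤ start: exactly drop-then-take here
      (table.drop start).take m

-- ===== PRECONDITION & SPEC =====
-- Pre_: exactly the inputs where A returns normally (starting_term is one of the allowed terms);
-- elsewhere A raises ValueError.
def Pre_build_semester_sequence (starting_term : String) (starting_year : Int) (available_winter : Bool) (available_summer : Bool) (max_terms : Int) : Prop :=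
  starting_term ∈ ((if available_winter then ["Winter"] else []) ++ ["Spring"] ++
                   (if available_summer then ["Summer"] else []) ++ ["Fall"])
instance (starting_term : String) (starting_year : Int) (available_winter : Bool) (available_summer : Bool) (max_terms : Int) : Decidable (Pre_build_semester_sequence starting_term starting_year available_winter available_summer max_terms) := by unfold Pre_build_semester_sequence; infer_instance

def pvWitness_build_semester_sequence : String × Int × Bool × Bool × Int := ("Fall", 2024, false, true, 5)

def Spec_build_semester_sequence (starting_term : String) (starting_year : Int) (available_winter : Bool) (available_summer : Bool) (max_terms : Int) (out : List (String × Int)) : Prop := out = build_semester_sequence_alt starting_term starting_year available_winter available_summer max_terms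
instance (starting_term : String) (starting_year : Int) (available_winter : Bool) (available_summer : Bool) (max_terms : Int) (out : List (String × Int)) : Decidable (Spec_build_semester_sequence starting_term starting_year available_winter available_summer max_terms out) := by unfold Spec_build_semester_sequence; infer_instance

-- ===== CLAIM (what is proved, stated in full; the proofs are below) =====
def Claim_equal_build_semester_sequence : Prop := ∀ (starting_term : String) (starting_year : Int) (available_winter : Bool) (available_summer : Bool) (max_terms : Int), Dom_build_semester_sequence starting_term starting_year available_winter available_summer max_terms → Pre_build_semester_sequence starting_term starting_year available_winter available_summer max_terms → Spec_build_semester_sequence starting_term starting_year available_winter available_summer max_terms (build_semester_sequence starting_term starting_year available_winter available_summer max_terms)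

-- ===== LEMMAS AND PROOFS =====
-- A's while loop in closed form
theorem pvLoop_eq_range (allowed : List String) (fuel : Nat) :
    ∀ (idx : Nat) (year : Int), idx < allowed.length →
    pvLoopA allowed fuel idx year =
      (List.range fuel).map (fun i =>
        (allowed.getD ((idx + i) % allowed.length) "",
         year + (((idx + i) / allowed.length : Nat) : Int))) := by
  induction fuel with
  | zero => intro idx year _; rfl
  | succ f ih =>
    intro idx year hidx
    rw [List.range_succ_eq_map]
    simp only [pvLoopA, List.map_cons, List.map_map]
    have h0 : (idx + 0) % allowed.length = idx := by
      simp [Nat.mod_eq_of_lt hidx]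
    have hd : (idx + 0) / allowed.length = 0 := by
      simp [Nat.div_eq_of_lt hidx]
    by_cases hge : idx + 1 ≥ allowed.length
    · have hn : idx + 1 = allowed.length := by omega
      have hpos : 0 < allowed.length := by omega
      rw [if_pos hge, ih 0 (year + 1) hpos]
      simp only [h0, hd]
      congr 1
      · simp
      · apply List.map_congr_left
        intro i _
        simp only [Function.comp_apply, Nat.succ_eq_add_one]
        have e1 : idx + (i + 1) = allowed.length + i := by omega
        have e2 : (allowed.length + i) % allowed.length = (0 + i) % allowed.length := by
          simp [Nat.add_mod_left]
        have e3 : ((allowed.length + i) / allowed.length : Nat) = (0 + i) / allowed.length + 1 := by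
          rw [Nat.add_comm allowed.length i, Nat.add_div_right _ hpos]
          simp
        rw [e1, e2, e3]
        push_cast
        ring_nf
    · have hlt : idx + 1 < allowed.length := by omega
      rw [if_neg hge, ih (idx + 1) year hlt]
      simp only [h0, hd]
      congr 1
      · simp
      · apply List.map_congr_left
        intro i _
        simp only [Function.comp_apply, Nat.succ_eq_add_one]
        have e1 : idx + 1 + i = idx + (i + 1) := by omega
        rw [e1]

theorem cover_le (a n : Nat) (h : 0 < n) : a ≤ (a + n - 1) / n * n := by
  rw [Nat.mul_comm]
  have hdm := Nat.div_add_mod (a + n - 1) n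
  have hmod := Nat.mod_lt (a + n - 1) h
  omega

-- B's rectangular table in closed form
theorem table_eq_range (allowed : List String) (sy : Int) (hpos : 0 < allowed.length) :
    ∀ (years : Nat),
    (List.range years).flatMap (fun (y : Nat) => allowed.map (fun t => (t, sy + (y : Int)))) =
      (List.range (years * allowed.length)).map (fun j =>
        (allowed.getD (j % allowed.length) "", sy + ((j / allowed.length : Nat) : Int))) := by
  intro years
  induction years with
  | zero => simp
  | succ y ih =>
    have hsz : (y + 1) * allowed.length = y * allowed.length + allowed.length := by ring
    rw [List.range_succ, List.flatMap_append, ih, hsz, List.range_add, List.map_append,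
        List.map_map]
    congr 1
    simp only [List.flatMap_cons, List.flatMap_nil, List.append_nil]
    apply List.ext_getElem
    · simp
    · intro i h1 h2
      simp only [List.getElem_map, List.getElem_range, Function.comp_apply]
      have hi : i < allowed.length := by simpa using h1
      have e2 : (y * allowed.length + i) % allowed.length = i := by
        rw [Nat.add_comm, Nat.add_mul_mod_self_right, Nat.mod_eq_of_lt hi]
      have e3 : (y * allowed.length + i) / allowed.length = y := by
        rw [Nat.add_comm, Nat.add_mul_div_right _ _ hpos, Nat.div_eq_of_lt hi]; simp
      simp [e2, e3, List.getD, List.getElem?_eq_getElem hi]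

theorem pre_mem (starting_term : String) (available_winter available_summer : Bool)
    (h : Pre_build_semester_sequence starting_term 0 available_winter available_summer 0) :
    starting_term ∈ ((["Winter", "Spring", "Summer", "Fall"]).filter
      (fun t => (t ≠ "Winter" ∨ available_winter) ∧ (t ≠ "Summer" ∨ available_summer))) := by
  unfold Pre_build_semester_sequence at h
  cases available_winter <;> cases available_summer <;> simp_all

-- ===== VERDICT (by name: the statement is the Claim_ definition above) =====
theorem build_semester_sequence_spec : Claim_equal_build_semester_sequence := by
  intro starting_term starting_year available_winter available_summer max_terms _ hpre
  unfold Spec_build_semester_sequence build_semester_sequence build_semester_sequence_alt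
  have hmem := pre_mem starting_term available_winter available_summer hpre
  have hlists : (["Winter", "Spring", "Summer", "Fall"] : List String).foldl (fun acc term =>
      if term = "Winter" ∧ ¬ available_winter then acc
      else if term = "Summer" ∧ ¬ available_summer then acc
      else acc ++ [term]) [] =
      (["Winter", "Spring", "Summer", "Fall"]).filter
      (fun t => (t ≠ "Winter" ∨ available_winter) ∧ (t ≠ "Summer" ∨ available_summer)) := by
    cases available_winter <;> cases available_summer <;> decide
  simp only [hlists]
  set allowed := (["Winter", "Spring", "Summer", "Fall"]).filter
      (fun t => (t ≠ "Winter" ∨ available_winter) ∧ (t ≠ "Summer" ∨ available_summer)) with hA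
  have hsome : (PySem.List.index? allowed starting_term).isSome := by
    rw [PySem.List.index?_isSome_iff]; exact hmem
  obtain ⟨k, hk⟩ := Option.isSome_iff_exists.mp hsome
  obtain ⟨hklt, -, -⟩ := PySem.List.getElem_of_index?_eq_some hk
  rw [hk]
  simp only
  have hpos : 0 < allowed.length := by omega
  by_cases hm : max_terms ≤ 0
  · have : max_terms.toNat = 0 := by omega
    rw [if_pos hm, this]
    rfl
  · rw [if_neg hm]
    set m := max_terms.toNat with hmdef
    have hm1 : 1 ≤ m := by omega
    have hcover : k + m ≤ (k + m + allowed.length - 1) / allowed.length * allowed.length :=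
      cover_le (k + m) allowed.length hpos
    rw [table_eq_range allowed starting_year hpos,
        pvLoop_eq_range allowed m k starting_year hklt]
    apply List.ext_getElem
    · simp
      omega
    · intro i h1 h2
      rw [List.getElem_map, List.getElem_range, List.getElem_take, List.getElem_drop,
          List.getElem_map, List.getElem_range, Nat.add_comm k i]
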